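-- pv_equiv track=rewrite | github.com/agorinenko/yandex-interview | hash_table/group_anagrams.py | encode_str
-- ===== SOURCE A (Python) =====
-- import collections
--
-- def encode_str(s: str) -> str:
--     encode_dict = collections.defaultdict(int)
--     for c in s:
--         encode_dict[c] += 1
--
--     keys = sorted(encode_dict.keys())
--     res = []
--     for k in keys:
--         res.append(f'{k}{encode_dict[k]}')
--
--     return ''.join(res)
-- ===== SOURCE B (Python) =====
-- def encode_str(s: str) -> str:
--     t = sorted(s)
--     out = []
--     while t:
--         c = t[0]
--         k = 0
--         while k < len(t) and t[k] == c:
--             k += 1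
--         out.append(f'{c}{k}')
--         t = t[k:]
--     return ''.join(out)
-- ===== Notes on version B (the rewrite author's own statement) =====
-- stated objective: alternative
-- what changed: Replaces the frequency dict plus sort over distinct keys with sorting the whole string once and run-length encoding the consecutive equal-character runs.
import Mathlib
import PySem

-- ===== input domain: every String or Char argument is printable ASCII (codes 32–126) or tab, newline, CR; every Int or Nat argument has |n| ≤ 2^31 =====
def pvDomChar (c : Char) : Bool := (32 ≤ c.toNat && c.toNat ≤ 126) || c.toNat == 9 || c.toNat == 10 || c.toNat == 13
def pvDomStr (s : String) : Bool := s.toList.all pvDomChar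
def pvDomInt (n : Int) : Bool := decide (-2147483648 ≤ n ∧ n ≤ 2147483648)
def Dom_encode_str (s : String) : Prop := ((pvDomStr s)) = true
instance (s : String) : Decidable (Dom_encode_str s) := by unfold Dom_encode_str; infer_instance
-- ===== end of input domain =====

-- B sorts the whole string once and run-length-encodes the consecutive runs instead of
-- A's frequency dict plus a sort over its distinct keys; same output, alternative algorithm.

-- ===== PORT A =====
def encode_str (s : String) : String :=
  -- encode_dict = defaultdict(int); for c in s: encode_dict[c] += 1
  let encode_dict : PySem.Dict Char Int :=
    s.toList.foldl (fun d c => d.modify c 0 (· + 1)) PySem.Dict.empty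
  -- keys = sorted(encode_dict.keys())
  let keys := PySem.List.sorted encode_dict.keys (fun k => k)
  -- res = []; for k in keys: res.append(f'{k}{encode_dict[k]}')
  let res : List (List Char) :=
    keys.foldl (fun r k => r ++ [[k] ++ PySem.Int.toChars (encode_dict.getD k 0)]) []
  -- return ''.join(res)
  String.ofList (PySem.Chars.join [] res)

-- ===== PORT B =====
-- the outer `while t:` loop of Source B; the inner counting loop yields k = length of the
-- run of t[0] at the front of t (the takeWhile prefix), and `t = t[k:]` drops exactly it
def bGroups : List Char → List (List Char)
  | [] => []
  | c :: rest =>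
      (c :: PySem.Int.toChars ((((c :: rest).takeWhile (fun x => x == c)).length : Int)))
        :: bGroups ((c :: rest).dropWhile (fun x => x == c))
termination_by t => t.length
decreasing_by
  simp only [List.dropWhile_cons, beq_self_eq_true, if_true, List.length_cons]
  exact Nat.lt_succ_of_le (List.length_dropWhile_le _ _)

def encode_str_alt (s : String) : String :=
  String.ofList (PySem.Chars.join [] (bGroups (PySem.List.sorted s.toList (fun c => c))))

-- ===== PRECONDITION & SPEC =====
def Spec_encode_str (s : String) (out : String) : Prop := out = encode_str_alt s
instance (s : String) (out : String) : Decidable (Spec_encode_str s out) := by unfold Spec_encode_str; infer_instance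

-- ===== CLAIM (what is proved, stated in full; the proofs are below) =====
def Claim_equal_encode_str : Prop := ∀ (s : String), Dom_encode_str s → Spec_encode_str s (encode_str s)

-- ===== LEMMAS AND PROOFS =====

-- the run-length groups of a (≤-)sorted list are exactly its distinct elements in
-- increasing order, each with its count
theorem bGroups_eq_map_aux : ∀ (n : Nat) (m : List Char), m.length ≤ n → m.Pairwise (· ≤ ·) →
    bGroups m
      = (PySem.List.sorted (PySem.Set.ofList m) (fun k => k)).map
          (fun k => k :: PySem.Int.toChars ((List.count k m : Int))) := by
  intro n
  induction n with
  | zero =>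
    intro m hm _
    have hnil : m = [] := List.eq_nil_of_length_eq_zero (Nat.le_zero.mp hm)
    subst hnil
    simp only [bGroups]
    rfl
  | succ n ih =>
    intro m hm h
    match m with
    | [] =>
      simp only [bGroups]
      rfl
    | c :: t =>
      have hct : ∀ x ∈ t, c ≤ x := fun x hx => List.rel_of_pairwise_cons h hx
      have ht_pw : t.Pairwise (· ≤ ·) := (List.pairwise_cons.mp h).2
      have htd_sub : (t.dropWhile (fun x => x == c)).Sublist t := List.dropWhile_sublist _
      have htd_pw : (t.dropWhile (fun x => x == c)).Pairwise (· ≤ ·) :=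
        List.Pairwise.sublist htd_sub ht_pw
      have htw_all : ∀ x ∈ t.takeWhile (fun x => x == c), x = c := by
        intro x hx; simpa using List.mem_takeWhile_imp hx
      have hctd : c ∉ t.dropWhile (fun x => x == c) := by
        intro hc
        obtain ⟨d, td', hcons⟩ := List.exists_cons_of_ne_nil (List.ne_nil_of_mem hc)
        have hdne : d ≠ c := by
          have w : t.dropWhile (fun x => x == c) ≠ [] := List.ne_nil_of_mem hc
          have hh := List.head_dropWhile_not (fun x => x == c) w
          simp only [hcons, List.head_cons] at hh
          simpa using hh
        have hdmem : d ∈ t := htd_sub.subset (by rw [hcons]; exact List.mem_cons_self)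
        have hlt : c < d := lt_of_le_of_ne (hct _ hdmem) (Ne.symm hdne)
        rw [hcons] at hc
        rcases List.mem_cons.mp hc with h1 | h1
        · exact hdne h1.symm
        · have hdc : d ≤ c := List.rel_of_pairwise_cons (hcons ▸ htd_pw) h1
          exact absurd hlt (not_lt.mpr hdc)
      have hK : PySem.List.sorted (PySem.Set.ofList (c :: t)) (fun k => k)
              = c :: PySem.List.sorted (PySem.Set.ofList (t.dropWhile (fun x => x == c))) (fun k => k) := by
        apply PySem.List.sorted_eq_of_perm_of_pairwise_lt
        · rw [List.perm_ext_iff_of_nodup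
            (List.nodup_cons.mpr ⟨fun hx => hctd (by simpa [PySem.List.mem_sorted, PySem.Set.mem_ofList] using hx),
              ((PySem.List.sorted_perm _ _ _).nodup_iff).mpr (PySem.Set.nodup_ofList _)⟩)
            (PySem.Set.nodup_ofList _)]
          intro x
          simp only [List.mem_cons, PySem.List.mem_sorted, PySem.Set.mem_ofList]
          constructor
          · rintro (rfl | hx)
            · exact Or.inl rfl
            · exact Or.inr (htd_sub.subset hx)
          · rintro (rfl | hx)
            · exact Or.inl rfl
            · have h2 : x ∈ t.takeWhile (fun x => x == c) ++ t.dropWhile (fun x => x == c) := by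
                rw [List.takeWhile_append_dropWhile]; exact hx
              rcases List.mem_append.mp h2 with h3 | h3
              · exact Or.inl (htw_all _ h3)
              · exact Or.inr h3
        · refine List.pairwise_cons.mpr ⟨?_, ?_⟩
          · intro x hx
            have hxtd : x ∈ t.dropWhile (fun x => x == c) := by
              simpa [PySem.List.mem_sorted, PySem.Set.mem_ofList] using hx
            exact lt_of_le_of_ne (hct _ (htd_sub.subset hxtd)) (fun e => hctd (e ▸ hxtd))
          · exact PySem.List.sorted_ofList_pairwise_lt _
      have hcount_c : List.count c (c :: t) = (t.takeWhile (fun x => x == c)).length + 1 := by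
        rw [List.count_cons_self]
        congr 1
        conv_lhs => rw [← List.takeWhile_append_dropWhile (p := fun x => x == c) (l := t)]
        rw [List.count_append, List.count_eq_zero.mpr hctd, Nat.add_zero]
        exact List.count_eq_length.mpr (fun b hb => (htw_all b hb).symm)
      have htd_len : (t.dropWhile (fun x => x == c)).length ≤ n := by
        have h1 := List.length_dropWhile_le (fun x => x == c) t
        have h2 : t.length ≤ n := by simpa using Nat.succ_le_succ_iff.mp (by simpa using hm)
        omega
      have hIH := ih (t.dropWhile (fun x => x == c)) htd_len htd_pw
      have hmapeq : (PySem.List.sorted (PySem.Set.ofList (t.dropWhile (fun x => x == c))) (fun k => k)).map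
            (fun k => k :: PySem.Int.toChars ((List.count k (t.dropWhile (fun x => x == c)) : Int)))
          = (PySem.List.sorted (PySem.Set.ofList (t.dropWhile (fun x => x == c))) (fun k => k)).map
            (fun k => k :: PySem.Int.toChars ((List.count k (c :: t) : Int))) := by
        apply List.map_congr_left
        intro k hk
        have hktd : k ∈ t.dropWhile (fun x => x == c) := by
          simpa [PySem.List.mem_sorted, PySem.Set.mem_ofList] using hk
        have hkc : k ≠ c := fun e => hctd (e ▸ hktd)
        have h1 : List.count k (c :: t) = List.count k t := List.count_cons_of_ne (Ne.symm hkc)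
        have h2 : List.count k t = List.count k (t.dropWhile (fun x => x == c)) := by
          conv_lhs => rw [← List.takeWhile_append_dropWhile (p := fun x => x == c) (l := t)]
          rw [List.count_append, List.count_eq_zero.mpr (fun hx => hkc (htw_all _ hx)), Nat.zero_add]
        rw [h1, h2]
      rw [bGroups]
      simp only [List.takeWhile_cons, List.dropWhile_cons, beq_self_eq_true, if_true,
        List.length_cons]
      rw [hK, List.map_cons, hIH, hmapeq, hcount_c]

theorem bGroups_eq_map (m : List Char) (h : m.Pairwise (· ≤ ·)) :
    bGroups m
      = (PySem.List.sorted (PySem.Set.ofList m) (fun k => k)).map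
          (fun k => k :: PySem.Int.toChars ((List.count k m : Int))) :=
  bGroups_eq_map_aux m.length m le_rfl h

theorem encode_str_spec_aux (s : String) : encode_str s = encode_str_alt s := by
  unfold encode_str encode_str_alt
  rw [← PySem.Dict.counter_eq_foldl]
  dsimp only
  rw [PySem.Dict.keys_counter,
      PySem.List.foldl_append_singleton_eq_map
        (fun k => [k] ++ PySem.Int.toChars ((PySem.Dict.counter s.toList).getD k 0)),
      List.nil_append]
  have hpw : (PySem.List.sorted s.toList (fun c => c)).Pairwise (· ≤ ·) :=
    PySem.List.sorted_pairwise s.toList (fun c => c)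
  rw [bGroups_eq_map _ hpw]
  have hperm : (PySem.List.sorted s.toList (fun c => c)).Perm s.toList :=
    PySem.List.sorted_perm s.toList (fun c => c) false
  have hofl : (PySem.Set.ofList (PySem.List.sorted s.toList (fun c => c))).Perm
      (PySem.Set.ofList s.toList) := by
    rw [List.perm_ext_iff_of_nodup (PySem.Set.nodup_ofList _) (PySem.Set.nodup_ofList _)]
    intro a
    simp only [PySem.Set.mem_ofList]
    exact ⟨fun hx => hperm.subset hx, fun hx => hperm.symm.subset hx⟩
  have hsorted_eq : PySem.List.sorted (PySem.Set.ofList (PySem.List.sorted s.toList (fun c => c))) (fun k => k)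
      = PySem.List.sorted (PySem.Set.ofList s.toList) (fun k => k) :=
    PySem.List.sorted_eq_sorted_of_perm _ _ _ (fun _ _ hab => hab) hofl
  rw [hsorted_eq]
  congr 1
  congr 1
  apply List.map_congr_left
  intro k _
  simp only [PySem.Dict.getD_counter, List.singleton_append]
  rw [hperm.count_eq k]

-- ===== VERDICT (by name: the statement is the Claim_ definition above) =====
theorem encode_str_spec : Claim_equal_encode_str := by
  intro s _
  exact encode_str_spec_aux s
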